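-- pv_equiv track=rewrite | github.com/cstuartroe/misc | Python/CoinFlips/main.py | first_tie
-- ===== SOURCE A (Python) =====
-- def first_tie(seq) -> int | None:
--     i = 0
--     sum = 0
--
--     for e in seq:
--         sum += e
--         i += 1
--         if sum == 0:
--             return i
--
--     return None
-- ===== SOURCE B (Python) =====
-- def first_tie(seq) -> int | None:
--     prefix = []
--     s = 0
--     for e in seq:
--         s += e
--         prefix.append(s)
--     try:
--         return prefix.index(0) + 1
--     except ValueError:
--         return None
-- ===== Notes on version B (the rewrite author's own statement) =====
-- stated objective: alternative
-- what changed: Replaces the fused count-and-test loop with two phases: build the full prefix-sum list, then locate the first zero with list.index.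
import Mathlib
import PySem

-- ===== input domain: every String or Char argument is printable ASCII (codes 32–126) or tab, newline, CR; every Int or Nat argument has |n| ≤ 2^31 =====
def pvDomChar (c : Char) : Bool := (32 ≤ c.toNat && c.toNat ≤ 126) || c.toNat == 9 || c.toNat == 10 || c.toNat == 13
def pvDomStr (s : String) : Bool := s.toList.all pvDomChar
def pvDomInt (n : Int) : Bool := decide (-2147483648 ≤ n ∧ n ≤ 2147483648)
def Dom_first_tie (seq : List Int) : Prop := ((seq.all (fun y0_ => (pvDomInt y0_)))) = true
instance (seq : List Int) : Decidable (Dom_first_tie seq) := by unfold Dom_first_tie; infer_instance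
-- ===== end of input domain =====

-- B replaces A's fused running-sum loop and early return by two phases: build the prefix-sum list, then find the first zero with list.index (objective: alternative decomposition).


-- ===== PORT A =====
-- A's loop: state (i, sum), early return when sum hits 0.
def firstTieGo : List Int → Int → Int → Option Int
  | [], _, _ => none
  | e :: rest, i, s =>
    let s' := s + e
    let i' := i + 1
    if s' = 0 then some i' else firstTieGo rest i' s'

def first_tie (seq : List Int) : Option Int := firstTieGo seq 0 0

-- ===== PORT B =====
-- phase 1 of Source B: the populating loop building the prefix-sum list
def prefixSums : List Int → Int → List Int
  | [], _ => []
  | e :: rest, s => (s + e) :: prefixSums rest (s + e)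

def first_tie_alt (seq : List Int) : Option Int :=
  let pre := prefixSums seq 0
  match PySem.List.index? pre 0 with
  | some k => some ((k : Int) + 1)
  | none => none

-- ===== PRECONDITION & SPEC =====
def Spec_first_tie (seq : List Int) (out : Option Int) : Prop := out = first_tie_alt seq
instance (seq : List Int) (out : Option Int) : Decidable (Spec_first_tie seq out) := by unfold Spec_first_tie; infer_instance

-- ===== CLAIM (what is proved, stated in full; the proofs are below) =====
def Claim_equal_first_tie : Prop := ∀ (seq : List Int), Dom_first_tie seq → Spec_first_tie seq (first_tie seq)

-- ===== LEMMAS AND PROOFS =====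
theorem firstTieGo_eq (seq : List Int) : ∀ (i s : Int),
    firstTieGo seq i s =
      (match PySem.List.index? (prefixSums seq s) 0 with
       | some k => some (i + ((k : Int) + 1))
       | none => none) := by
  induction seq with
  | nil => intro i s; rfl
  | cons e rest ih =>
    intro i s
    simp only [firstTieGo, prefixSums]
    by_cases h : s + e = 0
    · rw [if_pos h, h, PySem.List.index?_cons_self]
      simp
    · rw [if_neg h, PySem.List.index?_cons_of_ne (prefixSums rest (s + e)) h, ih]
      cases PySem.List.index? (prefixSums rest (s + e)) 0 with
      | none => rfl
      | some k =>
        simp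
        ring

-- ===== VERDICT (by name: the statement is the Claim_ definition above) =====
theorem first_tie_spec : Claim_equal_first_tie := by
  intro seq _
  unfold Spec_first_tie first_tie first_tie_alt
  rw [firstTieGo_eq]
  simp only [PySem.List.index?_eq_idxOf?]
  cases List.idxOf? 0 (prefixSums seq 0) <;> simp
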